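-- pv_equiv track=rewrite | github.com/bchamradova/BNXproject | src/Helpers/MatrixHelper.py | getCircularValuesFromMatrix
-- ===== SOURCE A (Python) =====
-- import math
--
-- def getCircularValuesFromMatrix(matrix):
--     size = len(matrix)
--     center = math.ceil(size/2)
--     half = math.floor(size/2)
--     for i in range(half):
--         for cell in range(0,center-i-1):
--             matrix[i][cell] = matrix[i][-1-cell] = matrix[-1-i][cell] = matrix[-1-i][-1-cell] = 0
--     return matrix
-- ===== SOURCE B (Python) =====
-- def getCircularValuesFromMatrix(matrix):
--     size = len(matrix)
--     center = (size + 1) // 2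
--     for r in range(size):
--         row = matrix[r]
--         k = center - 1 - min(r, size - 1 - r)
--         L = len(row)
--         for c in range(L):
--             if min(c, L - 1 - c) < k:
--                 row[c] = 0
--     return matrix
-- ===== Notes on version B (the rewrite author's own statement) =====
-- stated objective: alternative
-- what changed: B replaces A's walk over the corner triangles with four symmetric negative-index writes per step by a single scan of all cells with one corner-distance predicate, zeroing a cell exactly when min(c, L-1-c) < ceil(size/2)-1-min(r, size-1-r); same O(size^2) cost, no negative indexing or chained assignment.
import Mathlib
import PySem

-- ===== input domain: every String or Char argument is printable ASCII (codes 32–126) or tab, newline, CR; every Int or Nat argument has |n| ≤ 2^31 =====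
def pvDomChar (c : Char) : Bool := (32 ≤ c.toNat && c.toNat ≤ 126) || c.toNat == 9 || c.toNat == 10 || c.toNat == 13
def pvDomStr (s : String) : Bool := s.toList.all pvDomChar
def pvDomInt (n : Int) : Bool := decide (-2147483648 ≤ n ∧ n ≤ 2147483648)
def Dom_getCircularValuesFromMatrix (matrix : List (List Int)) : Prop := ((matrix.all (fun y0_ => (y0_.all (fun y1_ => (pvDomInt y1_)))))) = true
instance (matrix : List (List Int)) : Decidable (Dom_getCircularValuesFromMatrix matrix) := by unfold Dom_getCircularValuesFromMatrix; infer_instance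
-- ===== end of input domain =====

-- B replaces A's four-symmetric-writes walk over the corner triangles by a single scan of
-- every cell with one corner-distance predicate (objective: alternative, same cost).  Both Pythons mutate
-- the argument in place the same way; the equivalence proved here is about the return value.

-- ===== PORT A =====
-- Python's `row[c] = v` with a possibly negative index c: resolves c against the row length,
-- writes if in range; out of range means IndexError in Python, excluded by Pre_ below
-- (on those inputs this port leaves the list unchanged).
-- resolution of a possibly negative Python index against a length
def pvRes (i : Int) (n : Nat) : Int := if i < 0 then i + n else i

def pvSetIdx (xs : List Int) (i : Int) (v : Int) : List Int :=
  if 0 ≤ pvRes i xs.length ∧ pvRes i xs.length < (xs.length : Int)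
  then xs.set (pvRes i xs.length).toNat v else xs

-- `matrix[r][c] = v` with possibly negative r and c.
def pvSetCell (m : List (List Int)) (r c : Int) (v : Int) : List (List Int) :=
  if 0 ≤ pvRes r m.length ∧ pvRes r m.length < (m.length : Int)
  then m.set (pvRes r m.length).toNat (pvSetIdx (m.getD (pvRes r m.length).toNat []) c v) else m

def getCircularValuesFromMatrix (matrix : List (List Int)) : List (List Int) :=
  let size := matrix.length
  let center := (size + 1) / 2          -- math.ceil(size/2)
  let half := size / 2                  -- math.floor(size/2)
  (List.range half).foldl (fun m (i : Nat) =>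
    (List.range (center - i - 1)).foldl (fun m (cell : Nat) =>
      let m1 := pvSetCell m (i : Int) (cell : Int) 0
      let m2 := pvSetCell m1 (i : Int) (-1 - (cell : Int)) 0
      let m3 := pvSetCell m2 (-1 - (i : Int)) (cell : Int) 0
      pvSetCell m3 (-1 - (i : Int)) (-1 - (cell : Int)) 0) m) matrix

-- ===== PORT B =====
def getCircularValuesFromMatrix_alt (matrix : List (List Int)) : List (List Int) :=
  let size := matrix.length
  let center := (size + 1) / 2
  matrix.zipIdx.map (fun p =>
    let row := p.1
    let r := p.2
    let k : Int := (center : Int) - 1 - min (r : Int) ((size : Int) - 1 - r)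
    let L := row.length
    row.zipIdx.map (fun q =>
      if min (q.2 : Int) ((L : Int) - 1 - q.2) < k then 0 else q.1))

-- ===== PRECONDITION & SPEC =====
-- Pre_ excludes exactly the inputs where A raises IndexError: some row the corner walk
-- touches is shorter than the number of cells to zero at each of its ends.
def Pre_getCircularValuesFromMatrix (matrix : List (List Int)) : Prop :=
  ∀ p ∈ matrix.zipIdx,
    ((matrix.length + 1) / 2 : Int) - 1 - min (p.2 : Int) ((matrix.length : Int) - 1 - p.2)
      ≤ (p.1.length : Int)
instance (matrix : List (List Int)) : Decidable (Pre_getCircularValuesFromMatrix matrix) := by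
  unfold Pre_getCircularValuesFromMatrix; infer_instance

def pvWitness_getCircularValuesFromMatrix : List (List Int) := [[1, 2], [3, 4]]

def Spec_getCircularValuesFromMatrix (matrix : List (List Int)) (out : List (List Int)) : Prop :=
  out = getCircularValuesFromMatrix_alt matrix
instance (matrix : List (List Int)) (out : List (List Int)) : Decidable (Spec_getCircularValuesFromMatrix matrix out) := by
  unfold Spec_getCircularValuesFromMatrix; infer_instance

-- ===== CLAIM (what is proved, stated in full; the proofs are below) =====
def Claim_equal_getCircularValuesFromMatrix : Prop := ∀ (matrix : List (List Int)), Dom_getCircularValuesFromMatrix matrix → Pre_getCircularValuesFromMatrix matrix → Spec_getCircularValuesFromMatrix matrix (getCircularValuesFromMatrix matrix)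


-- ===== LEMMAS AND PROOFS =====

-- entry view of a matrix
def pvGet2 (m : List (List Int)) (r c : Nat) : Int := (m.getD r []).getD c 0

-- does the write (r,c) land on cell (r',c')?  (nrows = matrix length, L = length of row r')
def pvHits (nrows L : Nat) (r c : Int) (r' c' : Nat) : Bool :=
  pvRes r nrows == (r' : Int) && decide (r' < nrows) && (pvRes c L == (c' : Int)) && decide (c' < L)

def pvPaint (ws : List (Int × Int)) (m : List (List Int)) : List (List Int) :=
  ws.foldl (fun m w => pvSetCell m w.1 w.2 0) m

def pvWrites (size : Nat) : List (Int × Int) :=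
  (List.range (size / 2)).flatMap (fun (i : Nat) =>
    (List.range ((size + 1) / 2 - i - 1)).flatMap (fun (cell : Nat) =>
      [((i : Int), (cell : Int)), ((i : Int), -1 - (cell : Int)),
       (-1 - (i : Int), (cell : Int)), (-1 - (i : Int), -1 - (cell : Int))]))

theorem pvSetIdx_length (xs : List Int) (i v : Int) : (pvSetIdx xs i v).length = xs.length := by
  unfold pvSetIdx; split <;> simp

theorem pvSetCell_length (m : List (List Int)) (r c v : Int) :
    (pvSetCell m r c v).length = m.length := by
  unfold pvSetCell; split <;> simp

theorem pvSetIdx_getD (xs : List Int) (i v : Int) (c' : Nat) (hc : c' < xs.length) :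
    (pvSetIdx xs i v).getD c' 0 =
      if pvRes i xs.length == (c' : Int) then v else xs.getD c' 0 := by
  unfold pvSetIdx
  split
  · rename_i h
    by_cases hj : (pvRes i xs.length).toNat = c'
    · have he : pvRes i xs.length = (c' : Int) := by omega
      simp [List.getD_eq_getElem?_getD, List.getElem?_set, hj, he, hc]
    · have he : ¬ (pvRes i xs.length = (c' : Int)) := by omega
      simp [List.getD_eq_getElem?_getD, List.getElem?_set, hj, he]
  · rename_i h
    have he : ¬ (pvRes i xs.length = (c' : Int)) := by omega
    simp [he]

theorem pvSetCell_rowlen (m : List (List Int)) (r c v : Int) (r' : Nat) :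
    ((pvSetCell m r c v).getD r' []).length = (m.getD r' []).length := by
  unfold pvSetCell
  split
  · rename_i h
    by_cases hj : (pvRes r m.length).toNat = r'
    · have hr' : r' < m.length := by omega
      simp [List.getD_eq_getElem?_getD, List.getElem?_set, hj, hr', pvSetIdx_length]
    · simp [List.getD_eq_getElem?_getD, List.getElem?_set, hj]
  · rfl

theorem pvSetCell_get2 (m : List (List Int)) (r c v : Int) (r' c' : Nat)
    (hc : c' < (m.getD r' []).length) :
    pvGet2 (pvSetCell m r c v) r' c' =
      if pvHits m.length (m.getD r' []).length r c r' c' then v else pvGet2 m r' c' := by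
  unfold pvGet2 pvHits pvSetCell
  split
  · rename_i h
    by_cases hj : (pvRes r m.length).toNat = r'
    · have hr' : r' < m.length := by omega
      have he : pvRes r m.length = (r' : Int) := by omega
      have hrow : (m.set (pvRes r m.length).toNat
          (pvSetIdx (m.getD (pvRes r m.length).toNat []) c v)).getD r' []
          = pvSetIdx (m.getD r' []) c v := by
        rw [hj]
        simp [List.getD_eq_getElem?_getD, List.getElem?_set, hr']
      rw [hrow, pvSetIdx_getD _ _ _ _ hc, he]
      have hc2 : c' < (m[r']?.getD []).length := by
        simpa [List.getD_eq_getElem?_getD] using hc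
      have hc3 : c' < (m[r']'hr').length := by
        simpa [List.getElem?_eq_getElem, hr'] using hc2
      simp [hr', hc3]
    · have he : ¬ (pvRes r m.length = (r' : Int)) := by omega
      have hrow : (m.set (pvRes r m.length).toNat
          (pvSetIdx (m.getD (pvRes r m.length).toNat []) c v)).getD r' []
          = m.getD r' [] := by
        simp [List.getD_eq_getElem?_getD, List.getElem?_set, hj]
      rw [hrow]
      simp [he]
  · rename_i h
    by_cases hr' : r' < m.length
    · have he : ¬ (pvRes r m.length = (r' : Int)) := by omega
      simp [he]
    · simp [hr']

theorem pvPaint_length (ws : List (Int × Int)) (m : List (List Int)) :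
    (pvPaint ws m).length = m.length := by
  induction ws generalizing m with
  | nil => rfl
  | cons w ws ih =>
    show (pvPaint ws (pvSetCell m w.1 w.2 0)).length = m.length
    rw [ih, pvSetCell_length]

theorem pvPaint_rowlen (ws : List (Int × Int)) (m : List (List Int)) (r' : Nat) :
    ((pvPaint ws m).getD r' []).length = (m.getD r' []).length := by
  induction ws generalizing m with
  | nil => rfl
  | cons w ws ih =>
    show ((pvPaint ws (pvSetCell m w.1 w.2 0)).getD r' []).length = (m.getD r' []).length
    rw [ih, pvSetCell_rowlen]

theorem pvPaint_get2 (ws : List (Int × Int)) (m : List (List Int)) (r' c' : Nat)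
    (hc : c' < (m.getD r' []).length) :
    pvGet2 (pvPaint ws m) r' c' =
      if ws.any (fun w => pvHits m.length (m.getD r' []).length w.1 w.2 r' c') then 0
      else pvGet2 m r' c' := by
  induction ws generalizing m with
  | nil => simp [pvPaint]
  | cons w ws ih =>
    have step : pvPaint (w :: ws) m = pvPaint ws (pvSetCell m w.1 w.2 0) := rfl
    have hlen : (pvSetCell m w.1 w.2 0).length = m.length := pvSetCell_length ..
    have hrow : ((pvSetCell m w.1 w.2 0).getD r' []).length = (m.getD r' []).length :=
      pvSetCell_rowlen ..
    rw [step, ih _ (by rw [hrow]; exact hc), hlen, hrow,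
      pvSetCell_get2 _ _ _ _ _ _ hc]
    by_cases h1 : pvHits m.length (m.getD r' []).length w.1 w.2 r' c' = true <;>
      by_cases h2 : (ws.any (fun w => pvHits m.length (m.getD r' []).length w.1 w.2 r' c')) = true <;>
      (simp only [List.getD_eq_getElem?_getD] at h1 h2 ⊢; simp [List.any_cons, h1, h2])

theorem foldl_flatMap {α β γ : Type} (l : List α) (g : α → List β) (f : γ → β → γ) (init : γ) :
    (l.flatMap g).foldl f init = l.foldl (fun acc x => (g x).foldl f acc) init := by
  induction l generalizing init with
  | nil => rfl
  | cons x l ih => simp [List.flatMap_cons, List.foldl_append, ih]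

theorem A_eq_paint (m : List (List Int)) :
    getCircularValuesFromMatrix m = pvPaint (pvWrites m.length) m := by
  unfold getCircularValuesFromMatrix pvWrites pvPaint
  rw [foldl_flatMap]
  apply PySem.List.foldl_congr_mem
  intro acc i _
  rw [foldl_flatMap]
  apply PySem.List.foldl_congr_mem
  intro acc2 cell _
  simp [List.foldl]

theorem B_length (m : List (List Int)) : (getCircularValuesFromMatrix_alt m).length = m.length := by
  unfold getCircularValuesFromMatrix_alt; simp

theorem B_row (m : List (List Int)) (r' : Nat) (hr : r' < m.length) :
    (getCircularValuesFromMatrix_alt m).getD r' [] =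
      (m.getD r' []).zipIdx.map (fun q =>
        if min (q.2 : Int) (((m.getD r' []).length : Int) - 1 - q.2) <
            (((m.length + 1) / 2 : Nat) : Int) - 1 - min (r' : Int) ((m.length : Int) - 1 - r')
        then 0 else q.1) := by
  unfold getCircularValuesFromMatrix_alt
  simp [List.getD, List.getElem?_map, List.getElem?_eq_getElem, hr,
    List.getElem?_zipIdx]

-- the combinatorial core: some write of A lands on (r',c')  ↔  B's corner-distance predicate
theorem writes_hit_iff (size L r' c' : Nat) (hr : r' < size) (hc : c' < L) :
    ((pvWrites size).any (fun w => pvHits size L w.1 w.2 r' c') = true) ↔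
      min (c' : Int) ((L : Int) - 1 - c') <
        (((size + 1) / 2 : Nat) : Int) - 1 - min (r' : Int) ((size : Int) - 1 - r') := by
  rw [List.any_eq_true]
  constructor
  · rintro ⟨w, hw, hhit⟩
    rw [pvWrites, List.mem_flatMap] at hw
    obtain ⟨i, hi, hw⟩ := hw
    rw [List.mem_range] at hi
    rw [List.mem_flatMap] at hw
    obtain ⟨cell, hcell, hw⟩ := hw
    rw [List.mem_range] at hcell
    simp only [List.mem_cons, List.not_mem_nil, or_false] at hw
    rcases hw with h | h | h | h <;> subst h <;>
      (unfold pvHits pvRes at hhit;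
       simp only [Bool.and_eq_true, beq_iff_eq, decide_eq_true_eq] at hhit;
       split_ifs at hhit <;> omega)
  · intro hlt
    set d : Nat := min r' (size - 1 - r') with hd
    set e : Nat := min c' (L - 1 - c') with he
    have hdlt : d < size / 2 := by omega
    have helt : e < (size + 1) / 2 - d - 1 := by omega
    have hmem : ∀ w ∈ ([((d : Int), (e : Int)), ((d : Int), -1 - (e : Int)),
        (-1 - (d : Int), (e : Int)), (-1 - (d : Int), -1 - (e : Int))] : List (Int × Int)),
        w ∈ pvWrites size := by
      intro w hw
      rw [pvWrites, List.mem_flatMap]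
      exact ⟨d, List.mem_range.mpr hdlt, List.mem_flatMap.mpr ⟨e, List.mem_range.mpr helt, hw⟩⟩
    by_cases h1 : r' = d <;> by_cases h2 : c' = e
    · refine ⟨((d : Int), (e : Int)), hmem _ (by simp), ?_⟩
      unfold pvHits pvRes; simp only [Bool.and_eq_true, beq_iff_eq, decide_eq_true_eq]
      split_ifs <;> omega
    · refine ⟨((d : Int), -1 - (e : Int)), hmem _ (by simp), ?_⟩
      unfold pvHits pvRes; simp only [Bool.and_eq_true, beq_iff_eq, decide_eq_true_eq]
      split_ifs <;> omega
    · refine ⟨(-1 - (d : Int), (e : Int)), hmem _ (by simp), ?_⟩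
      unfold pvHits pvRes; simp only [Bool.and_eq_true, beq_iff_eq, decide_eq_true_eq]
      split_ifs <;> omega
    · refine ⟨(-1 - (d : Int), -1 - (e : Int)), hmem _ (by simp), ?_⟩
      unfold pvHits pvRes; simp only [Bool.and_eq_true, beq_iff_eq, decide_eq_true_eq]
      split_ifs <;> omega

theorem getElem_eq_getD {α : Type} (d : α) (l : List α) (r : Nat) (h : r < l.length) :
    l[r]'h = l.getD r d := by
  simp [List.getD_eq_getElem?_getD, List.getElem?_eq_getElem, h]

-- ===== VERDICT (by name: the statement is the Claim_ definition above) =====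
theorem getCircularValuesFromMatrix_spec : Claim_equal_getCircularValuesFromMatrix := by
  intro matrix _ _
  unfold Spec_getCircularValuesFromMatrix
  rw [A_eq_paint]
  apply List.ext_getElem
  · rw [pvPaint_length, B_length]
  · intro r' h1 h2
    have hr : r' < matrix.length := by rwa [pvPaint_length] at h1
    rw [getElem_eq_getD [], getElem_eq_getD [], B_row matrix r' hr]
    apply List.ext_getElem
    · rw [pvPaint_rowlen]; simp
    · intro c' hc1 hc2
      have hcL : c' < (matrix.getD r' []).length := by rwa [pvPaint_rowlen] at hc1
      rw [getElem_eq_getD 0]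
      have hmap : c' < ((matrix.getD r' []).zipIdx.map (fun q =>
          if min (q.2 : Int) (((matrix.getD r' []).length : Int) - 1 - q.2) <
              (((matrix.length + 1) / 2 : Nat) : Int) - 1 -
                min (r' : Int) ((matrix.length : Int) - 1 - r')
          then 0 else q.1)).length := hc2
      rw [List.getElem_map, List.getElem_zipIdx]
      dsimp only
      simp only [Nat.zero_add]
      have hpaint : ((pvPaint (pvWrites matrix.length) matrix).getD r' []).getD c' 0 =
          pvGet2 (pvPaint (pvWrites matrix.length) matrix) r' c' := rfl
      have hentry := pvPaint_get2 (pvWrites matrix.length) matrix r' c' hcL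
      rw [hpaint, hentry]
      by_cases hP : min (c' : Int) (((matrix.getD r' []).length : Int) - 1 - c') <
          (((matrix.length + 1) / 2 : Nat) : Int) - 1 -
            min (r' : Int) ((matrix.length : Int) - 1 - r')
      · rw [if_pos ((writes_hit_iff matrix.length (matrix.getD r' []).length r' c' hr hcL).mpr hP),
          if_pos hP]
      · rw [if_neg (fun hany => hP
            ((writes_hit_iff matrix.length (matrix.getD r' []).length r' c' hr hcL).mp hany)),
          if_neg hP]
        exact (getElem_eq_getD 0 _ c' hcL).symm
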